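-- pv_equiv track=rewrite | github.com/tpalczew/Daily-coding | Python/String_maniuplations/anagram.py | solution
-- ===== SOURCE A (Python) =====
-- def solution(S, W):
--     windowSize = len(W)
--     result = []
--     for elem in range(len(S)-windowSize+1):
--         counter=0
--         for el in S[elem:elem+windowSize]:
--             if el not in W:
--                 break
--             else:
--                 counter+=1
--         if counter == windowSize:
--             result.append(elem)
--     return result
--
-- W = 'ab'
--
-- S = 'abxaba'
-- ===== SOURCE B (Python) =====
-- def solution(S, W):
--     m = len(W)
--     if m == 0:
--         return list(range(len(S) + 1))
--     allowed = set(W)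
--     result = []
--     run = 0
--     for i, ch in enumerate(S):
--         run = run + 1 if ch in allowed else 0
--         if run >= m:
--             result.append(i - m + 1)
--     return result
-- ===== Notes on version B (the rewrite author's own statement) =====
-- stated objective: alternative
-- what changed: Replaces A's per-start rescan of every window (slice + inner membership loop with break) by a single left-to-right sliding pass that keeps a running count of consecutive characters belonging to set(W) and emits a window start whenever the run reaches len(W).
import Mathlib
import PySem

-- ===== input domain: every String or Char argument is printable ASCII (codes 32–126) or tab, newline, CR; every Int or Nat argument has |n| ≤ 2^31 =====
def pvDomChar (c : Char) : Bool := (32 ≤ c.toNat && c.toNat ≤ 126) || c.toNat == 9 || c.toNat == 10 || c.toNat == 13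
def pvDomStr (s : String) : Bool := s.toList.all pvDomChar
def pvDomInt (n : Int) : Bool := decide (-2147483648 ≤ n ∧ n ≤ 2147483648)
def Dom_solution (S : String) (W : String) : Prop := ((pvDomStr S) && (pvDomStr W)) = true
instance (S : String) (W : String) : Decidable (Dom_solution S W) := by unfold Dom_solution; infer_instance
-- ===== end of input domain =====

-- B replaces A's per-window rescan by a single sliding pass keeping a running count of
-- consecutive characters that belong to set(W) (objective: alternative algorithm, same result).

-- ===== PORT A =====
-- inner 'for el in S[elem:elem+windowSize]: if el not in W: break; else: counter += 1'
def solLoopA (w : List Char) : List Char → Int → Int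
  | [], counter => counter
  | el :: rest, counter =>
    if ¬ (el ∈ w) then counter else solLoopA w rest (counter + 1)

def solution (S : String) (W : String) : List Int :=
  let s := S.toList
  let w := W.toList
  let windowSize : Int := (w.length : Int)
  List.foldl (fun result elem =>
      let counter := solLoopA w (PySem.List.slice s (some elem) (some (elem + windowSize))) 0
      if counter = windowSize then result ++ [elem] else result)
    [] (PySem.List.pyRange 0 ((s.length : Int) - windowSize + 1) 1)

-- ===== PORT B =====
def solution_alt (S : String) (W : String) : List Int :=
  let s := S.toList
  let m : Int := (W.toList.length : Int)
  if m = 0 then PySem.List.pyRange 0 ((s.length : Int) + 1) 1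
  else
    let allowed : PySem.Set Char := PySem.Set.ofList W.toList
    (List.foldl (fun (st : List Int × Int) p =>
        let run : Int := if allowed.contains p.2 then st.2 + 1 else 0
        (if m ≤ run then st.1 ++ [p.1 - m + 1] else st.1, run))
      ([], 0) (PySem.List.enumerate s 0)).1

-- ===== PRECONDITION & SPEC =====
def Spec_solution (S : String) (W : String) (out : List Int) : Prop := out = solution_alt S W
instance (S : String) (W : String) (out : List Int) : Decidable (Spec_solution S W out) := by unfold Spec_solution; infer_instance

-- ===== CLAIM (what is proved, stated in full; the proofs are below) =====
def Claim_equal_solution : Prop := ∀ (S : String) (W : String), Dom_solution S W → Spec_solution S W (solution S W)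

-- ===== LEMMAS AND PROOFS =====

-- common specification: all starts s of width-|w| windows of l whose characters all lie in w
def specList (l w : List Char) : List Int :=
  (List.filter (fun s => ((l.drop s).take w.length).all (fun c => decide (c ∈ w)))
      (List.range (l.length + 1 - w.length))).map (fun (s : Nat) => (s : Int))

-- length of the longest all-valid suffix of l
def runLen (w l : List Char) : Nat :=
  (l.reverse.takeWhile (fun c => decide (c ∈ w))).length

lemma tw_ge_iff {α : Type} (p : α → Bool) : ∀ (l : List α) (m : Nat), m ≤ l.length →
    ((m ≤ (l.takeWhile p).length) ↔ (l.take m).all p) := by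
  intro l
  induction l with
  | nil => intro m h; simp at h; simp [h]
  | cons x t ih =>
    intro m h
    cases m with
    | zero => simp
    | succ k =>
      simp only [List.takeWhile, List.take, List.all_cons]
      cases hx : p x with
      | true => simpa [hx] using ih k (by simpa using h)
      | false => simp

lemma solLoopA_eq (w : List Char) : ∀ (xs : List Char) (c : Int),
    solLoopA w xs c = c + ((xs.takeWhile (fun ch => decide (ch ∈ w))).length : Int) := by
  intro xs
  induction xs with
  | nil => intro c; simp [solLoopA]
  | cons x t ih =>
    intro c
    by_cases hx : x ∈ w
    · simp [solLoopA, hx, ih]; ring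
    · simp [solLoopA, hx]

lemma A_core (l w : List Char) :
    List.foldl (fun result elem =>
        if solLoopA w (PySem.List.slice l (some elem) (some (elem + (w.length : Int)))) 0
            = (w.length : Int) then result ++ [elem] else result)
      [] (PySem.List.pyRange 0 ((l.length : Int) - (w.length : Int) + 1) 1) = specList l w := by
  by_cases hmn : w.length ≤ l.length + 1
  · have hcast : (l.length : Int) - (w.length : Int) + 1 = ((l.length + 1 - w.length : Nat) : Int) := by
      omega
    rw [hcast, PySem.List.pyRange_zero_natCast, List.foldl_map]
    have hcongr := PySem.List.foldl_congr_mem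
      (l := List.range (l.length + 1 - w.length)) (init := ([] : List Int))
      (f := fun acc (s : Nat) =>
        if solLoopA w (PySem.List.slice l (some (s : Int)) (some ((s : Int) + (w.length : Int)))) 0
            = (w.length : Int) then acc ++ [((s : Nat) : Int)] else acc)
      (g := fun acc (s : Nat) =>
        if ((l.drop s).take w.length).all (fun c => decide (c ∈ w)) then acc ++ [((s : Nat) : Int)] else acc)
      (by
        intro acc s hs
        simp only []
        have hs' : s < l.length + 1 - w.length := List.mem_range.mp hs
        have hsm : s + w.length ≤ l.length := by omega
        rw [PySem.List.slice_natCast_add, solLoopA_eq]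
        have hlen : ((l.drop s).take w.length).length = w.length := by
          simp [List.length_take, List.length_drop]; omega
        have hle : (((l.drop s).take w.length).takeWhile (fun ch => decide (ch ∈ w))).length ≤ w.length :=
          le_of_le_of_eq (List.takeWhile_sublist _).length_le hlen
        have hiff : (0 + ((((l.drop s).take w.length).takeWhile (fun ch => decide (ch ∈ w))).length : Int)
            = (w.length : Int))
            ↔ (((l.drop s).take w.length).all (fun c => decide (c ∈ w)) = true) := by
          rw [zero_add]
          constructor
          · intro h
            have hge : w.length ≤ (((l.drop s).take w.length).takeWhile (fun ch => decide (ch ∈ w))).length := by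
              omega
            have := (tw_ge_iff _ _ w.length (le_of_eq hlen.symm)).mp hge
            rwa [List.take_of_length_le (le_of_eq hlen)] at this
          · intro h
            have h' : (((l.drop s).take w.length).take w.length).all (fun c => decide (c ∈ w)) := by
              rwa [List.take_of_length_le (le_of_eq hlen)]
            have hge := (tw_ge_iff _ _ w.length (le_of_eq hlen.symm)).mpr h'
            omega
        split_ifs with h1 h2 h2
        · rfl
        · exact absurd (hiff.mp h1) (by simpa using h2)
        · exact absurd (hiff.mpr h2) h1
        · rfl)
    rw [hcongr, PySem.List.foldl_append_if
      (p := fun s => ((l.drop s).take w.length).all (fun c => decide (c ∈ w)))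
      (f := fun (s : Nat) => ((s : Nat) : Int))]
    simp only [List.nil_append]
    rfl
  · have hnil : PySem.List.pyRange 0 ((l.length : Int) - (w.length : Int) + 1) 1 = [] := by
      simp [PySem.List.pyRange]; omega
    have hz : l.length + 1 - w.length = 0 := by omega
    simp [hnil, specList, hz]

lemma A_eq_spec (S W : String) : solution S W = specList S.toList W.toList := by
  unfold solution
  exact A_core S.toList W.toList

lemma runLen_le (w l : List Char) : runLen w l ≤ l.length := by
  unfold runLen
  calc _ ≤ l.reverse.length := (List.takeWhile_sublist _).length_le
    _ = l.length := List.length_reverse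

lemma runLen_append (w l : List Char) (c : Char) :
    runLen w (l ++ [c]) = if c ∈ w then runLen w l + 1 else 0 := by
  unfold runLen
  rw [List.reverse_append]
  by_cases h : c ∈ w <;> simp [h]

lemma spec_append (l w : List Char) (c : Char) (hm : w.length ≠ 0) :
    specList (l ++ [c]) w =
      if w.length ≤ runLen w (l ++ [c])
        then specList l w ++ [(l.length : Int) - (w.length : Int) + 1]
        else specList l w := by
  by_cases hmn : w.length ≤ l.length + 1
  · have hsucc : (l ++ [c]).length + 1 - w.length = (l.length + 1 - w.length) + 1 := by
      simp; omega
    unfold specList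
    rw [hsucc, List.range_succ, List.filter_append, List.map_append]
    have hfc : (List.range (l.length + 1 - w.length)).filter
          (fun s => (((l ++ [c]).drop s).take w.length).all (fun ch => decide (ch ∈ w)))
        = (List.range (l.length + 1 - w.length)).filter
          (fun s => ((l.drop s).take w.length).all (fun ch => decide (ch ∈ w))) := by
      apply List.filter_congr
      intro s hs
      have hs' : s < l.length + 1 - w.length := List.mem_range.mp hs
      rw [List.drop_append_of_le_length (by omega), List.take_append_of_le_length (by simp; omega)]
    rw [hfc]
    have hlenL : (l ++ [c]).length = l.length + 1 := by simp
    have hnew : (((l ++ [c]).drop (l.length + 1 - w.length)).take w.length).all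
          (fun ch => decide (ch ∈ w))
        = decide (w.length ≤ runLen w (l ++ [c])) := by
      have hdl : ((l ++ [c]).drop (l.length + 1 - w.length)).length = w.length := by
        simp; omega
      rw [List.take_of_length_le (le_of_eq hdl)]
      have hrev : (l ++ [c]).reverse.take w.length
          = ((l ++ [c]).drop ((l ++ [c]).length - w.length)).reverse := List.take_reverse
      have hdrop_eq : (l ++ [c]).length - w.length = l.length + 1 - w.length := by simp
      have hall : ((l ++ [c]).drop (l.length + 1 - w.length)).all (fun ch => decide (ch ∈ w))
          = ((l ++ [c]).reverse.take w.length).all (fun ch => decide (ch ∈ w)) := by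
        rw [hrev, hdrop_eq, List.all_reverse]
      rw [hall]
      have hiff := tw_ge_iff (fun ch => decide (ch ∈ w)) (l ++ [c]).reverse w.length
        (by simp; omega)
      unfold runLen
      exact Bool.coe_iff_coe.mp (by rw [decide_eq_true_eq]; exact hiff.symm)
    split_ifs with h
    · have hcast : ((l.length + 1 - w.length : Nat) : Int) = (l.length : Int) - (w.length : Int) + 1 := by
        omega
      simp [hnew, h, hcast]
    · simp [hnew, h]
  · have h1 : l.length + 1 + 1 - w.length = 0 := by omega
    have h2 : l.length + 1 - w.length = 0 := by omega
    have h3 : ¬ (w.length ≤ runLen w (l ++ [c])) := by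
      have := runLen_le w (l ++ [c])
      simp at this
      omega
    simp [specList, h1, h2, h3]

lemma set_contains_eq (w : List Char) (c : Char) :
    (PySem.Set.ofList w).contains c = decide (c ∈ w) := by
  by_cases h : c ∈ w
  · simp [h, (PySem.Set.contains_iff _ _).mpr ((PySem.Set.mem_ofList w c).mpr h)]
  · have hfalse : (PySem.Set.ofList w).contains c = false := by
      cases hcb : (PySem.Set.ofList w).contains c with
      | false => rfl
      | true =>
        exact absurd ((PySem.Set.mem_ofList w c).mp ((PySem.Set.contains_iff _ _).mp hcb)) h
    simp [h, hfalse]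

lemma B_core (l w : List Char) (hm : w.length ≠ 0) :
    List.foldl (fun (st : List Int × Int) p =>
        let run : Int := if (PySem.Set.ofList w).contains p.2 then st.2 + 1 else 0
        (if (w.length : Int) ≤ run then st.1 ++ [p.1 - (w.length : Int) + 1] else st.1, run))
      ([], 0) (PySem.List.enumerate l 0)
    = (specList l w, (runLen w l : Int)) := by
  induction l using List.reverseRecOn with
  | nil =>
    have : (0 : Nat) + 1 - w.length = 0 := by omega
    simp [PySem.List.enumerate, specList, runLen, this]
  | append_singleton l c ih =>
    rw [PySem.List.enumerate_append, List.foldl_append, ih]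
    simp only [PySem.List.enumerate, List.foldl_cons, List.foldl_nil, set_contains_eq]
    rw [spec_append l w c hm, runLen_append]
    by_cases hc : c ∈ w
    · by_cases hge : w.length ≤ runLen w l + 1
      · have hgeI : (w.length : Int) ≤ (runLen w l : Int) + 1 := by omega
        simp only [hc, decide_true, if_true, if_pos hge, if_pos hgeI, zero_add, Prod.mk.injEq]
        exact ⟨trivial, by omega⟩
      · have hgeI : ¬ ((w.length : Int) ≤ (runLen w l : Int) + 1) := by omega
        simp only [hc, decide_true, if_true, if_neg hge, if_neg hgeI, Prod.mk.injEq]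
        exact ⟨trivial, by omega⟩
    · have h1 : ¬ ((w.length : Int) ≤ (0 : Int)) := by omega
      have h2 : ¬ (w.length ≤ 0) := by omega
      simp only [hc, decide_false, Bool.false_eq_true, if_false, if_neg h1, if_neg h2,
        Prod.mk.injEq]
      exact ⟨trivial, by omega⟩

lemma B_eq_spec (S W : String) : solution_alt S W = specList S.toList W.toList := by
  unfold solution_alt
  by_cases h0 : W.toList.length = 0
  · have hz : (W.toList.length : Int) = 0 := by omega
    rw [if_pos hz]
    have hcast : (S.toList.length : Int) + 1 = ((S.toList.length + 1 : Nat) : Int) := by omega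
    rw [hcast, PySem.List.pyRange_zero_natCast]
    simp [specList, h0]
  · have hz : ¬ ((W.toList.length : Int) = 0) := by omega
    rw [if_neg hz]
    have := congrArg Prod.fst (B_core S.toList W.toList h0)
    simpa using this

-- ===== VERDICT (by name: the statement is the Claim_ definition above) =====
theorem solution_spec : Claim_equal_solution := by
  intro S W _
  unfold Spec_solution
  rw [A_eq_spec, B_eq_spec]
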